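-- pv_equiv track=rewrite | github.com/Maerig/advent_of_code_2020 | day10/day10.py | possible_combinations
-- ===== SOURCE A (Python) =====
-- from typing import Generator
--
-- def possible_combinations(group, i=1) -> Generator[list[int], None, None]:
--     if i >= len(group) - 1:
--         yield group
--         return
--     for subgroup in possible_combinations(group, i + 1):
--         yield subgroup
--     for subgroup in possible_combinations(group[:i] + group[i + 1:], i):
--         yield subgroup
-- ===== SOURCE B (Python) =====
-- def possible_combinations(group, i=1):
--     if i >= len(group) - 1:
--         yield group
--         return
--     prefix, last = group[:i], group[-1]
--     # Build every keep/drop pattern of the interior elements in one iterative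
--     # pass (keep-before-drop, leftmost element slowest-varying), then glue the
--     # fixed prefix and last element around each pattern.
--     subs = [[]]
--     for x in reversed(group[i:-1]):
--         subs = [[x] + s for s in subs] + subs
--     for s in subs:
--         yield prefix + s + [last]
-- ===== Notes on version B (the rewrite author's own statement) =====
-- stated objective: alternative
-- what changed: Replaces A's two-branch recursion (keep group[i] vs delete it and re-slice) by a single non-recursive pass that materialises every keep/drop pattern of the interior elements group[i:-1] in A's exact order and glues the fixed prefix and last element around each pattern.
import Mathlib
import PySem

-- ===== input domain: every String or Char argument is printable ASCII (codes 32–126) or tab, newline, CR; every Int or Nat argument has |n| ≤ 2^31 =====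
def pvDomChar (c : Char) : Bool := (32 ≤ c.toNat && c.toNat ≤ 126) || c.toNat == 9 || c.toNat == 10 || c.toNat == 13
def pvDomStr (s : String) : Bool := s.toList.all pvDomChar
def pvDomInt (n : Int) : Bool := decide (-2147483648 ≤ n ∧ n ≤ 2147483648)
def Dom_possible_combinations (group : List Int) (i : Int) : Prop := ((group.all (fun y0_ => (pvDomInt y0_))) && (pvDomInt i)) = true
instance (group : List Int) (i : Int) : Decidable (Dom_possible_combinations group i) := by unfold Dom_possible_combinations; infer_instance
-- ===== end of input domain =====

-- B replaces A's two-branch recursion by one iterative pass that materialises every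
-- keep/drop pattern of the interior elements in A's order (objective: alternative,
-- non-recursive decomposition; same exact output sequence).
-- A is a generator; both ports return the list of yielded values.

-- ===== PORT A =====
-- A's recursion diverges for i < 0 with i < len(group)-1 (Pre_ excludes those inputs);
-- the fuel argument group.length + 1 is enough for every input Pre_ admits and only
-- makes the port total (the 0-fuel branch is never reached inside Pre_).
def pcAFuel : Nat → List Int → Int → List (List Int)
  | 0, _, _ => []
  | f + 1, group, i =>
    if (group.length : Int) - 1 ≤ i then [group]
    else
      pcAFuel f group (i + 1) ++
        pcAFuel f (PySem.List.slice group none (some i) ++ PySem.List.slice group (some (i + 1)) none) i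

def possible_combinations (group : List Int) (i : Int) : List (List Int) :=
  pcAFuel (group.length + 1) group i

-- ===== PORT B =====
def possible_combinations_alt (group : List Int) (i : Int) : List (List Int) :=
  if (group.length : Int) - 1 ≤ i then [group]
  else
    let pre := PySem.List.slice group none (some i)
    -- group[-1]: never an IndexError on inputs Pre_ admits (there 0 ≤ i < len-1, so group ≠ [])
    let last := (PySem.List.pyGet? group (-1)).getD 0
    let subs := (PySem.List.slice group (some i) (some (-1))).reverse.foldl
      (fun subs x => subs.map (fun s => [x] ++ s) ++ subs) [[]]
    subs.map (fun s => pre ++ s ++ [last])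

-- ===== PRECONDITION & SPEC =====
-- Pre_ excludes exactly the inputs with i < 0 and i < len(group)-1, on which A's
-- negative-index slicing re-inserts elements and the recursion never terminates
-- (A returns no value there; it admits every input on which A returns).
def Pre_possible_combinations (group : List Int) (i : Int) : Prop :=
  0 ≤ i ∨ (group.length : Int) - 1 ≤ i
instance (group : List Int) (i : Int) : Decidable (Pre_possible_combinations group i) := by
  unfold Pre_possible_combinations; infer_instance

def pvWitness_possible_combinations : List Int × Int := ([1, 2, 3, 4], 1)

def Spec_possible_combinations (group : List Int) (i : Int) (out : List (List Int)) : Prop := out = possible_combinations_alt group i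
instance (group : List Int) (i : Int) (out : List (List Int)) : Decidable (Spec_possible_combinations group i out) := by unfold Spec_possible_combinations; infer_instance

-- ===== CLAIM (what is proved, stated in full; the proofs are below) =====
def Claim_equal_possible_combinations : Prop := ∀ (group : List Int) (i : Int), Dom_possible_combinations group i → Pre_possible_combinations group i → Spec_possible_combinations group i (possible_combinations group i)

-- ===== LEMMAS AND PROOFS =====

-- the keep/drop patterns B's loop builds, as a foldr (= foldl over the reversed list)
def pvPat (m : List Int) : List (List Int) :=
  m.foldr (fun x acc => acc.map (fun s => [x] ++ s) ++ acc) [[]]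

lemma pvPat_cons (x : Int) (m : List Int) :
    pvPat (x :: m) = (pvPat m).map (fun s => [x] ++ s) ++ pvPat m := rfl

-- B in closed form: prefix/patterns-of-middle/last, for every j ≤ len-1
lemma alt_eq_M (group : List Int) (j : Nat) (hj : j + 1 ≤ group.length) :
    possible_combinations_alt group (j : Int) =
      (pvPat ((group.drop j).take (group.length - 1 - j))).map
        (fun s => group.take j ++ s ++ [(group.getLast?).getD 0]) := by
  have hne : group ≠ [] := by
    intro h; subst h; simp at hj
  unfold possible_combinations_alt
  by_cases hb : (group.length : Int) - 1 ≤ (j : Int)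
  · -- base: j = len - 1
    have hj' : j = group.length - 1 := by omega
    rw [if_pos hb]
    subst hj'
    simp only [Nat.sub_self, List.take_zero, pvPat, List.foldr_nil, List.map_cons,
      List.map_nil, List.append_nil, List.getLast?_eq_some_getLast hne, Option.getD_some]
    rw [← List.dropLast_eq_take, List.dropLast_concat_getLast hne]
  · rw [if_neg hb]
    have hjle : j ≤ group.length := by omega
    have hsl : PySem.List.slice group (some (j : Int)) (some (-1)) =
        (group.drop j).take (group.length - 1 - j) := by
      simp [PySem.List.slice, Nat.min_eq_left hjle]
    simp only [List.foldl_reverse, PySem.List.slice_to_natCast, PySem.List.pyGet?_neg_one, hsl]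
    rfl

-- the recursion step identity for B's closed form
lemma alt_step (group : List Int) (j : Nat) (hj : j + 2 ≤ group.length) :
    possible_combinations_alt group ((j : Int) + 1) ++
      possible_combinations_alt (group.take j ++ group.drop (j + 1)) (j : Int) =
    possible_combinations_alt group (j : Int) := by
  have hjlt : j < group.length := by omega
  have hlen' : (group.take j ++ group.drop (j + 1)).length = group.length - 1 := by
    simp [List.length_take, List.length_drop]; omega
  have e1 : possible_combinations_alt group ((j : Int) + 1) =
      (pvPat ((group.drop (j + 1)).take (group.length - 1 - (j + 1)))).map
        (fun s => group.take (j + 1) ++ s ++ [(group.getLast?).getD 0]) := by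
    have := alt_eq_M group (j + 1) (by omega)
    rwa [Nat.cast_add, Nat.cast_one] at this
  rw [e1, alt_eq_M (group.take j ++ group.drop (j + 1)) j (by omega),
      alt_eq_M group j (by omega)]
  have hdropne : group.drop (j + 1) ≠ [] := by
    intro h
    have := List.length_drop (l := group) (i := j + 1)
    rw [h] at this; simp at this; omega
  -- last elements agree
  have hlast : (group.take j ++ group.drop (j + 1)).getLast? = group.getLast? := by
    have hg2 : group.getLast? = (group.drop (j + 1)).getLast? := by
      conv_lhs => rw [← List.take_append_drop (j + 1) group]
      exact List.getLast?_append_of_ne_nil _ hdropne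
    rw [List.getLast?_append_of_ne_nil _ hdropne, hg2]
  -- prefixes of the removed-element list
  have htake' : (group.take j ++ group.drop (j + 1)).take j = group.take j := by
    rw [List.take_append_of_le_length (by simp [List.length_take]; omega)]
    simp [List.take_take]
  have hdrop' : (group.take j ++ group.drop (j + 1)).drop j = group.drop (j + 1) := by
    rw [List.drop_append_of_le_length (by simp [List.length_take]; omega)]
    simp
  -- middle of group at j is group[j] :: middle at j+1
  have hmid : (group.drop j).take (group.length - 1 - j) =
      group[j] :: (group.drop (j + 1)).take (group.length - 1 - (j + 1)) := by
    rw [← List.getElem_cons_drop hjlt]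
    have : group.length - 1 - j = (group.length - 1 - (j + 1)) + 1 := by omega
    rw [this, List.take_succ_cons]
  rw [hlast, htake', hdrop', hlen', hmid, pvPat_cons, List.map_append, List.map_map]
  have hmid2 : group.length - 1 - 1 - j = group.length - 1 - (j + 1) := by omega
  rw [hmid2]
  congr 1
  apply List.map_congr_left
  intro s _
  rw [List.take_succ_eq_append_getElem hjlt]
  simp only [Function.comp_apply, List.append_assoc]

-- fuel lemma: with enough fuel A's recursion equals B, for every natural index
lemma fuel_main : ∀ (f : Nat) (group : List Int) (j : Nat),
    group.length ≤ f + j → 0 < f →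
    pcAFuel f group (j : Int) = possible_combinations_alt group (j : Int) := by
  intro f
  induction f with
  | zero => intro _ _ _ hf; omega
  | succ f ih =>
    intro group j hlen _
    by_cases hb : (group.length : Int) - 1 ≤ (j : Int)
    · simp [pcAFuel, hb, possible_combinations_alt]
    · have hj2 : j + 2 ≤ group.length := by omega
      have hslice : PySem.List.slice group none (some (j : Int)) ++
          PySem.List.slice group (some ((j : Int) + 1)) none =
          group.take j ++ group.drop (j + 1) := by
        rw [PySem.List.slice_to_natCast]
        have : ((j : Int) + 1) = ((j + 1 : Nat) : Int) := by push_cast; ring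
        rw [this, PySem.List.slice_from_natCast]
      have hlen' : (group.take j ++ group.drop (j + 1)).length = group.length - 1 := by
        simp [List.length_take, List.length_drop]; omega
      have e1 : pcAFuel f group ((j : Int) + 1) = possible_combinations_alt group ((j : Int) + 1) := by
        have : ((j : Int) + 1) = ((j + 1 : Nat) : Int) := by push_cast; ring
        rw [this]
        exact ih group (j + 1) (by omega) (by omega)
      have e2 : pcAFuel f (group.take j ++ group.drop (j + 1)) (j : Int) =
          possible_combinations_alt (group.take j ++ group.drop (j + 1)) (j : Int) :=
        ih _ j (by omega) (by omega)
      simp only [pcAFuel, if_neg hb, hslice, e1, e2]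
      exact alt_step group j hj2

-- ===== VERDICT (by name: the statement is the Claim_ definition above) =====
theorem possible_combinations_spec : Claim_equal_possible_combinations := by
  intro group i _ hpre
  unfold Spec_possible_combinations possible_combinations
  rcases hpre with hpos | hbase
  · have hi : i = ((i.toNat : Nat) : Int) := (Int.toNat_of_nonneg hpos).symm
    rw [hi]
    exact fuel_main (group.length + 1) group i.toNat (by omega) (by omega)
  · have h1 : (group.length : Int) - 1 ≤ i := hbase
    simp [pcAFuel, h1, possible_combinations_alt]
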